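-- pv_equiv track=rewrite | github.com/evinism/mistql | py/mistql/builtins.py | _sequence_helper
-- ===== SOURCE A (Python) =====
-- from typing import List, Dict, Callable, Tuple
--
-- def _sequence_helper(arr: List[List[bool]], start=0) -> List[List[int]]:
--     firstArray = arr[0]
--     result: List[List[int]] = []
--     for idx in range(start, len(firstArray)):
--         if firstArray[idx]:
--             if len(arr) == 1:
--                 result.append([idx])
--             else:
--                 subResult = _sequence_helper(arr[1:], idx + 1)
--                 for i in range(len(subResult)):
--                     result.append([idx] + subResult[i])
--     return result
-- ===== SOURCE B (Python) =====
-- from typing import List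
--
-- def _sequence_helper(arr: List[List[bool]], start=0) -> List[List[int]]:
--     # Forward pass: greedy minimal chain; cuts[j] = lower bound on usable indices of row j.
--     # If some row has no usable True index, no sequence exists.
--     cuts = []
--     c = start
--     for row in arr:
--         cuts.append(c)
--         lo = None
--         for i in range(c, len(row)):
--             if row[i]:
--                 lo = i
--                 break
--         if lo is None:
--             return []
--         c = lo + 1
--     # Backward DP over (row, cut) pairs: each suffix level's sequence list is built exactly once.
--     pairs = list(zip(arr, cuts))
--     row, cut = pairs[-1]
--     seqs = [[i] for i in range(cut, len(row)) if row[i]]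
--     for row, cut in pairs[-2::-1]:
--         nxt = seqs
--         seqs = [[i] + s for i in range(cut, len(row)) if row[i] for s in nxt if s[0] > i]
--     return seqs
-- ===== Notes on version B (the rewrite author's own statement) =====
-- stated objective: faster
-- what changed: A's top-down recursion re-enumerates every suffix of rows once per chosen index; B first runs a greedy forward feasibility pass computing a per-row index cutoff (returning [] early when no chain exists) and then a bottom-up DP over the reversed rows that builds each suffix level's sequence list exactly once above its cutoff.
-- outside the precondition, e.g. on _sequence_helper([[True]], -1): A returns [[-1], [0]], B returns [[-1], [0]]; on _sequence_helper([[True]], -3): A raises IndexError, B raises IndexError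
import Mathlib
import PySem

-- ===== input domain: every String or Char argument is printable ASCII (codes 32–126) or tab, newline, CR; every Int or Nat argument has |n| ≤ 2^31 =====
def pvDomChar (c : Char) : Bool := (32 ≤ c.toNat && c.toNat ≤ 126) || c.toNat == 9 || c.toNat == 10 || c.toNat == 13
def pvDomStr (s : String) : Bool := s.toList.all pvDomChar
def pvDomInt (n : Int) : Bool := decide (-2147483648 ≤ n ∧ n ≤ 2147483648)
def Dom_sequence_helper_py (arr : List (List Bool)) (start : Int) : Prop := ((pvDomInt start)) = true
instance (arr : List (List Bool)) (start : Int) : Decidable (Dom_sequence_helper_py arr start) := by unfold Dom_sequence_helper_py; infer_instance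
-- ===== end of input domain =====

-- B replaces A's top-down recursion (which re-enumerates every suffix of rows once per chosen
-- index) by a feasibility pre-pass plus a bottom-up DP that builds each suffix level once.


-- ===== PORT A =====
-- Literal port of _sequence_helper: arr[0] on empty arr raises IndexError (the [] branch is
-- outside Pre_); firstArray[idx] is pyGetD (always in range when 0 ≤ start, which Pre_ demands).
def sequence_helper_py : List (List Bool) → Int → List (List Int)
  | [], _ => []
  | firstArray :: rest, start =>
    (PySem.List.pyRange start (firstArray.length : Int) 1).foldl
      (fun result idx =>
        if PySem.List.pyGetD firstArray idx false then
          if rest = [] then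
            result ++ [[idx]]
          else
            result ++ (sequence_helper_py rest (idx + 1)).map (fun s => idx :: s)
        else result) []

-- ===== PORT B =====
-- s[0] > i for a sequence s (sequences built below are always nonempty cons cells)
def pvHeadGt (i : Int) (s : List Int) : Bool :=
  match s with
  | h :: _ => decide (i < h)
  | [] => false

-- Source B's inner 'for i in range(c, len(row)): if row[i]: lo = i; break' — first usable index
def pvFirstTrue (row : List Bool) (c : Int) : Option Int :=
  (PySem.List.pyRange c (row.length : Int) 1).find? (fun i => PySem.List.pyGetD row i false)

-- Source B's forward loop: the cuts list, or none for its early 'return []'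
def pvCuts : List (List Bool) → Int → Option (List Int)
  | [], _ => some []
  | row :: rows, c =>
    match pvFirstTrue row c with
    | none => none
    | some lo => (pvCuts rows (lo + 1)).map (fun cs => c :: cs)

-- [[i] for i in range(cut, len(row)) if row[i]]
def pvBaseC (row : List Bool) (cut : Int) : List (List Int) :=
  (PySem.List.pyRange cut (row.length : Int) 1).flatMap
    (fun i => if PySem.List.pyGetD row i false then [[i]] else [])

-- [[i] + s for i in range(cut, len(row)) if row[i] for s in nxt if s[0] > i]
def pvStepC (row : List Bool) (cut : Int) (nxt : List (List Int)) : List (List Int) :=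
  (PySem.List.pyRange cut (row.length : Int) 1).flatMap
    (fun i => if PySem.List.pyGetD row i false then (nxt.filter (pvHeadGt i)).map (fun s => i :: s)
              else [])

-- pairs[-1] raises IndexError on empty arr (the inner none branch is outside Pre_);
-- pairs[-2::-1] is pairs.dropLast.reverse.
def sequence_helper_py_alt (arr : List (List Bool)) (start : Int) : List (List Int) :=
  match pvCuts arr start with
  | none => []
  | some cuts =>
    let pairs := arr.zip cuts
    match PySem.List.pyGet? pairs (-1) with
    | none => []
    | some lastPair =>
      (pairs.dropLast.reverse).foldl (fun nxt p => pvStepC p.1 p.2 nxt)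
        (pvBaseC lastPair.1 lastPair.2)

-- ===== PRECONDITION & SPEC =====
-- Pre_ excludes empty arr (A raises IndexError on arr[0]) and negative start: there Python's
-- negative-index wraparound makes A raise IndexError on part of the region (a set with no
-- closed-form description, reached deep in the recursion), so the whole region is excluded;
-- on the excluded inputs where A does return, B was observed to return the same value.
def Pre_sequence_helper_py (arr : List (List Bool)) (start : Int) : Prop :=
  arr ≠ [] ∧ 0 ≤ start
instance (arr : List (List Bool)) (start : Int) : Decidable (Pre_sequence_helper_py arr start) := by unfold Pre_sequence_helper_py; infer_instance

def pvWitness_sequence_helper_py : List (List Bool) × Int := ([[true, false], [true]], 0)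

def Spec_sequence_helper_py (arr : List (List Bool)) (start : Int) (out : List (List Int)) : Prop := out = sequence_helper_py_alt arr start
instance (arr : List (List Bool)) (start : Int) (out : List (List Int)) : Decidable (Spec_sequence_helper_py arr start out) := by unfold Spec_sequence_helper_py; infer_instance

-- ===== CLAIM (what is proved, stated in full; the proofs are below) =====
def Claim_equal_sequence_helper_py : Prop := ∀ (arr : List (List Bool)) (start : Int), Dom_sequence_helper_py arr start → Pre_sequence_helper_py arr start → Spec_sequence_helper_py arr start (sequence_helper_py arr start)

-- ===== LEMMAS AND PROOFS =====

-- s[0] >= c (proof-only: A's filtered-by-start view of a level)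
def pvHeadGe (c : Int) (s : List Int) : Bool :=
  match s with
  | h :: _ => decide (c ≤ h)
  | [] => false

-- the true indices of row, offset by s (proof-only skeleton of one DP level)
def pvSpine : List Bool → Int → List Int
  | [], _ => []
  | b :: bs, s => (if b then [s] else []) ++ pvSpine bs (s + 1)

-- recursive description of the full (cut-free) DP levels
def pvAll : List (List Bool) → List (List Int)
  | [] => []
  | [r] => (pvSpine r 0).map (fun i => [i])
  | r :: r' :: rest =>
    (pvSpine r 0).flatMap
      (fun i => ((pvAll (r' :: rest)).filter (pvHeadGt i)).map (fun s => i :: s))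

-- recursive description of B's fold over the reversed (row, cut) pairs
def pvAllC : List (List Bool × Int) → List (List Int)
  | [] => []
  | [p] => pvBaseC p.1 p.2
  | p :: q :: ps => pvStepC p.1 p.2 (pvAllC (q :: ps))

theorem pvGetD_cons_pos {α : Type} (b : α) (bs : List α) (i : Int) (h : 0 < i) (d : α) :
    PySem.List.pyGetD (b :: bs) i d = PySem.List.pyGetD bs (i - 1) d := by
  unfold PySem.List.pyGetD PySem.List.pyGet? PySem.List.pyIdx?
  rw [if_pos (by omega : (0:Int) ≤ i), if_pos (by omega : (0:Int) ≤ i - 1)]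
  by_cases hlt : i < ((b :: bs).length : Int)
  · rw [if_pos hlt, if_pos (by simp at hlt ⊢; omega)]
    rw [show i.toNat = (i - 1).toNat + 1 by omega]
    rfl
  · rw [if_neg hlt, if_neg (by simp at hlt ⊢; omega)]
    rfl

theorem pvSpine_nonneg (r : List Bool) (s i : Int) (h : i ∈ pvSpine r s) : s ≤ i := by
  induction r generalizing s with
  | nil => simp [pvSpine] at h
  | cons b bs ih =>
    simp only [pvSpine, List.mem_append] at h
    rcases h with h | h
    · split at h <;> simp_all
    · have := ih (s + 1) h; omega

theorem pvRange_ge (a b : Int) (ha : 0 ≤ a) :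
    PySem.List.pyRange a b 1 = (PySem.List.pyRange 0 b 1).filter (fun i => decide (a ≤ i)) := by
  by_cases hab : a ≤ b
  · rw [PySem.List.pyRange_one_append 0 a b ha hab, List.filter_append]
    rw [List.filter_eq_nil_iff.mpr, List.filter_eq_self.mpr]
    · simp
    · intro x hx
      rw [PySem.List.mem_pyRange_one] at hx
      simp only [decide_eq_true_eq]; omega
    · intro x hx
      rw [PySem.List.mem_pyRange_one] at hx
      simp only [decide_eq_true_eq]; omega
  · rw [PySem.List.pyRange_one_eq_nil (by omega)]
    symm
    rw [List.filter_eq_nil_iff]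
    intro x hx
    rw [PySem.List.mem_pyRange_one] at hx
    simp only [decide_eq_true_eq]; omega

theorem pvSpine_range (r : List Bool) (s : Int) (hs : 0 ≤ s) :
    (PySem.List.pyRange s (s + (r.length : Int)) 1).filter
      (fun i => PySem.List.pyGetD r (i - s) false) = pvSpine r s := by
  induction r generalizing s with
  | nil =>
    rw [show ((([] : List Bool)).length : Int) = 0 by simp,
        PySem.List.pyRange_one_eq_nil (by omega)]
    simp [pvSpine]
  | cons b bs ih =>
    have hlen : ((b :: bs).length : Int) = (bs.length : Int) + 1 := by simp
    rw [hlen, PySem.List.pyRange_one_cons (by omega : s < s + ((bs.length : Int) + 1))]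
    rw [List.filter_cons]
    have hhead : PySem.List.pyGetD (b :: bs) (s - s) false = b := by
      simp [PySem.List.pyGetD_zero_cons]
    have htail :
        (PySem.List.pyRange (s + 1) (s + ((bs.length : Int) + 1)) 1).filter
          (fun i => PySem.List.pyGetD (b :: bs) (i - s) false) = pvSpine bs (s + 1) := by
      rw [List.filter_congr (q := fun i => PySem.List.pyGetD bs (i - (s + 1)) false)]
      · rw [show s + ((bs.length : Int) + 1) = (s + 1) + (bs.length : Int) by ring]
        exact ih (s + 1) (by omega)
      · intro i hi
        rw [PySem.List.mem_pyRange_one] at hi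
        rw [pvGetD_cons_pos b bs (i - s) (by omega) false]
        congr 1; omega
    rw [hhead, htail]
    by_cases hb : b = true
    · simp [hb, pvSpine]
    · simp at hb; simp [hb, pvSpine]

-- pvSpine r 0 as a filtered index range (the bridge between A/B loops and the spine)
theorem pvSpine_zero (r : List Bool) :
    pvSpine r 0 = (PySem.List.pyRange 0 (r.length : Int) 1).filter
      (fun i => PySem.List.pyGetD r i false) := by
  have := pvSpine_range r 0 le_rfl
  simp only [zero_add, sub_zero] at this
  exact this.symm

-- the loops' index set: range(c, len r) restricted to true entries = spine filtered by c
theorem pvLoopRange (r : List Bool) (c : Int) (hc : 0 ≤ c) :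
    (PySem.List.pyRange c (r.length : Int) 1).filter
      (fun i => PySem.List.pyGetD r i false)
      = (pvSpine r 0).filter (fun i => decide (c ≤ i)) := by
  rw [pvRange_ge c (r.length : Int) hc, List.filter_filter, pvSpine_zero, List.filter_filter]
  apply List.filter_congr
  intro x _
  rw [Bool.and_comm]

theorem pvFlatMap_ite {β : Type} (l : List Int) (p : Int → Bool) (g : Int → List β) :
    l.flatMap (fun i => if p i then g i else []) = (l.filter p).flatMap g := by
  induction l with
  | nil => rfl
  | cons x xs ih =>
    rw [List.flatMap_cons, List.filter_cons]
    by_cases hp : p x = true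
    · simp [hp, ih]
    · simp at hp; simp [hp, ih]

theorem pvHeadGe_succ (i : Int) : pvHeadGe (i + 1) = pvHeadGt i := by
  funext s
  cases s with
  | nil => rfl
  | cons h t => simp [pvHeadGe, pvHeadGt]

theorem pvFilter_const {β : Type} (l : List β) (c : Bool) :
    l.filter (fun _ => c) = if c then l else [] := by
  cases c <;> simp

-- filtering a DP level by a head bound = restricting the head choices
theorem pvFilterLevel (r : List Bool) (c : Int) (Y : List (List Int)) :
    ((pvSpine r 0).flatMap
      (fun i => (Y.filter (pvHeadGt i)).map (fun s => i :: s))).filter (pvHeadGe c)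
    = ((pvSpine r 0).filter (fun i => decide (c ≤ i))).flatMap
        (fun i => (Y.filter (pvHeadGt i)).map (fun s => i :: s)) := by
  rw [List.filter_flatMap, ← pvFlatMap_ite (pvSpine r 0) (fun i => decide (c ≤ i))]
  apply List.flatMap_congr
  intro i _
  rw [List.filter_map]
  have hcomp : (pvHeadGe c ∘ fun s => i :: s) = fun _ => decide (c ≤ i) := by
    funext s; simp [pvHeadGe, Function.comp]
  rw [hcomp, pvFilter_const]
  split <;> simp

theorem pvFilterBase (r : List Bool) (c : Int) :
    ((pvSpine r 0).map (fun i => [i])).filter (pvHeadGe c)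
      = ((pvSpine r 0).filter (fun i => decide (c ≤ i))).map (fun i => [i]) := by
  rw [List.filter_map]
  apply congrArg
  apply List.filter_congr
  intro i _
  simp [pvHeadGe, Function.comp]

-- Main A-side lemma: A on a nonempty row list = the full DP level filtered by start
theorem pvA_eq (rest : List (List Bool)) :
    ∀ (r : List Bool) (start : Int), 0 ≤ start →
      sequence_helper_py (r :: rest) start = (pvAll (r :: rest)).filter (pvHeadGe start) := by
  induction rest with
  | nil =>
    intro r start hs
    unfold sequence_helper_py
    have hbody : (fun (result : List (List Int)) idx =>
        if PySem.List.pyGetD r idx false then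
          if ([] : List (List Bool)) = [] then result ++ [[idx]]
          else result ++ (sequence_helper_py [] (idx + 1)).map (fun s => idx :: s)
        else result)
        = fun result idx => result ++
            (if PySem.List.pyGetD r idx false then [[idx]] else []) := by
      funext acc idx; split <;> simp
    rw [hbody, PySem.List.foldl_append_eq_flatMap, List.nil_append,
        pvFlatMap_ite _ _ (fun i => [[i]]), pvLoopRange r start hs]
    show _ = ((pvSpine r 0).map (fun i => [i])).filter (pvHeadGe start)
    rw [pvFilterBase]
    induction (pvSpine r 0).filter (fun i => decide (start ≤ i)) with
    | nil => rfl
    | cons x xs ihx => rw [List.flatMap_cons, List.map_cons, ihx]; rfl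
  | cons r' rest' ih =>
    intro r start hs
    unfold sequence_helper_py
    have hbody : (fun (result : List (List Int)) idx =>
        if PySem.List.pyGetD r idx false then
          if (r' :: rest' : List (List Bool)) = [] then result ++ [[idx]]
          else result ++ (sequence_helper_py (r' :: rest') (idx + 1)).map (fun s => idx :: s)
        else result)
        = fun result idx => result ++
            (if PySem.List.pyGetD r idx false then
              (sequence_helper_py (r' :: rest') (idx + 1)).map (fun s => idx :: s) else []) := by
      funext acc idx; split <;> simp
    rw [hbody, PySem.List.foldl_append_eq_flatMap, List.nil_append,
        pvFlatMap_ite _ _ (fun i => (sequence_helper_py (r' :: rest') (i + 1)).map (fun s => i :: s)),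
        pvLoopRange r start hs]
    show _ = (pvAll (r :: r' :: rest')).filter (pvHeadGe start)
    unfold pvAll
    rw [pvFilterLevel]
    apply List.flatMap_congr
    intro i hi
    have hi0 : (0:Int) ≤ i := pvSpine_nonneg r 0 i (List.mem_of_mem_filter hi)
    rw [ih r' (i + 1) (by omega), pvHeadGe_succ i]

-- find? on an increasing list returns a minimal witness
theorem pvFind_min {p : Int → Bool} :
    ∀ (l : List Int), l.Pairwise (· < ·) → ∀ lo, l.find? p = some lo →
      ∀ x ∈ l, p x = true → lo ≤ x := by
  intro l hl
  induction l with
  | nil => intro lo h; simp at h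
  | cons a t ih =>
    intro lo hfind x hx hpx
    rcases List.pairwise_cons.mp hl with ⟨hat, ht⟩
    by_cases hpa : p a = true
    · rw [List.find?_cons_of_pos hpa] at hfind
      cases hfind
      rcases hx with _ | hx
      · exact le_refl _
      · exact le_of_lt (hat x (by assumption))
    · rw [List.find?_cons_of_neg hpa] at hfind
      rcases hx with _ | hx
      · exact absurd hpx hpa
      · exact ih ht lo hfind x (by assumption) hpx

-- properties of the first usable index
theorem pvFirstTrue_some (row : List Bool) (c lo : Int)
    (h : pvFirstTrue row c = some lo) :
    c ≤ lo ∧ (∀ i ∈ pvSpine row 0, c ≤ i → lo ≤ i) := by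
  unfold pvFirstTrue at h
  have hmem := List.mem_of_find?_eq_some h
  have hbounds := PySem.List.mem_pyRange_one.mp hmem
  refine ⟨hbounds.1, ?_⟩
  intro i hi hci
  have hspine := hi
  rw [pvSpine_zero] at hspine
  have hp : PySem.List.pyGetD row i false = true := (List.mem_filter.mp hspine).2
  have hrange : i ∈ PySem.List.pyRange c (row.length : Int) 1 := by
    rw [PySem.List.mem_pyRange_one]
    have := PySem.List.mem_pyRange_one.mp (List.mem_filter.mp hspine).1
    exact ⟨hci, this.2⟩
  exact pvFind_min _ (PySem.List.pairwise_lt_pyRange_one c (row.length : Int)) lo h i hrange hp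

theorem pvFirstTrue_none (row : List Bool) (c : Int) (h : pvFirstTrue row c = none) :
    ∀ i ∈ pvSpine row 0, ¬ (c ≤ i) := by
  unfold pvFirstTrue at h
  intro i hi hci
  rw [pvSpine_zero] at hi
  have hp : PySem.List.pyGetD row i false = true := (List.mem_filter.mp hi).2
  have hrange : i ∈ PySem.List.pyRange c (row.length : Int) 1 := by
    rw [PySem.List.mem_pyRange_one]
    have := PySem.List.mem_pyRange_one.mp (List.mem_filter.mp hi).1
    exact ⟨hci, this.2⟩
  have := List.find?_eq_none.mp h i hrange
  exact absurd hp (by simpa using this)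

-- B's concrete comprehensions as filtered-spine forms
theorem pvBaseC_eq (row : List Bool) (cut : Int) (hc : 0 ≤ cut) :
    pvBaseC row cut
      = ((pvSpine row 0).filter (fun i => decide (cut ≤ i))).map (fun i => [i]) := by
  unfold pvBaseC
  rw [pvFlatMap_ite _ _ (fun i => [[i]]), pvLoopRange row cut hc]
  induction (pvSpine row 0).filter (fun i => decide (cut ≤ i)) with
  | nil => rfl
  | cons x xs ihx => rw [List.flatMap_cons, List.map_cons, ihx]; rfl

theorem pvStepC_eq (row : List Bool) (cut : Int) (nxt : List (List Int)) (hc : 0 ≤ cut) :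
    pvStepC row cut nxt
      = ((pvSpine row 0).filter (fun i => decide (cut ≤ i))).flatMap
          (fun i => (nxt.filter (pvHeadGt i)).map (fun s => i :: s)) := by
  unfold pvStepC
  rw [pvFlatMap_ite _ _ (fun i => (nxt.filter (pvHeadGt i)).map (fun s => i :: s)),
      pvLoopRange row cut hc]

-- when the greedy chain fails, the filtered DP level is empty (A returns [])
theorem pvCuts_none (rows : List (List Bool)) :
    ∀ (c : Int), 0 ≤ c → rows ≠ [] → pvCuts rows c = none →
      (pvAll rows).filter (pvHeadGe c) = [] := by
  induction rows with
  | nil => intro c _ hne _; exact absurd rfl hne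
  | cons r rows' ih =>
    intro c hc _ hnone
    unfold pvCuts at hnone
    cases hft : pvFirstTrue r c with
    | none =>
      have hempty := pvFirstTrue_none r c hft
      cases rows' with
      | nil =>
        show ((pvSpine r 0).map (fun i => [i])).filter (pvHeadGe c) = []
        rw [pvFilterBase]
        rw [List.filter_eq_nil_iff.mpr]
        · rfl
        · intro i hi
          simpa using hempty i hi
      | cons r'' rows'' =>
        show ((pvSpine r 0).flatMap _).filter (pvHeadGe c) = []
        rw [pvFilterLevel]
        rw [List.filter_eq_nil_iff.mpr, List.flatMap_nil]
        intro i hi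
        simpa using hempty i hi
    | some lo =>
      simp only [hft, Option.map_eq_none_iff] at hnone
      obtain ⟨hclo, hmin⟩ := pvFirstTrue_some r c lo hft
      cases rows' with
      | nil => simp [pvCuts] at hnone
      | cons r'' rows'' =>
        have hsub := ih (lo + 1) (by omega) (by simp) hnone
        have hsubnil : ∀ s ∈ pvAll (r'' :: rows''), pvHeadGe (lo + 1) s = false := by
          intro s hs
          have := List.filter_eq_nil_iff.mp hsub s hs
          simpa using this
        show ((pvSpine r 0).flatMap _).filter (pvHeadGe c) = []
        rw [pvFilterLevel]
        rw [List.flatMap_eq_nil_iff.mpr]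
        intro i hi
        have hci : c ≤ i := by simpa using (List.mem_filter.mp hi).2
        have hloi : lo ≤ i := hmin i (List.mem_of_mem_filter hi) hci
        rw [List.filter_eq_nil_iff.mpr, List.map_nil]
        intro s hs hgt
        have hge : pvHeadGe (lo + 1) s = true := by
          cases s with
          | nil => simp [pvHeadGt] at hgt
          | cons h t =>
            simp only [pvHeadGt, decide_eq_true_eq] at hgt
            simp only [pvHeadGe, decide_eq_true_eq]
            omega
        rw [hsubnil s hs] at hge
        exact absurd hge (by simp)

-- when the greedy chain succeeds, B's cut DP levels = A's filtered full levels
theorem pvCuts_some (rows : List (List Bool)) :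
    ∀ (c : Int) (cuts : List Int), 0 ≤ c → rows ≠ [] → pvCuts rows c = some cuts →
      pvAllC (rows.zip cuts) = (pvAll rows).filter (pvHeadGe c) := by
  induction rows with
  | nil => intro c cuts _ hne _; exact absurd rfl hne
  | cons r rows' ih =>
    intro c cuts hc _ hsome
    unfold pvCuts at hsome
    cases hft : pvFirstTrue r c with
    | none => simp [hft] at hsome
    | some lo =>
      obtain ⟨hclo, hmin⟩ := pvFirstTrue_some r c lo hft
      cases hrec : pvCuts rows' (lo + 1) with
      | none => simp [hft, hrec] at hsome
      | some cs =>
        simp only [hft, hrec, Option.map_some, Option.some.injEq] at hsome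
        subst hsome
        cases rows' with
        | nil =>
          simp only [pvCuts, Option.some.injEq] at hrec
          subst hrec
          show pvBaseC r c = ((pvSpine r 0).map (fun i => [i])).filter (pvHeadGe c)
          rw [pvBaseC_eq r c hc, pvFilterBase]
        | cons r'' rows'' =>
          have hcs : cs ≠ [] := by
            intro hnil
            rw [hnil] at hrec
            unfold pvCuts at hrec
            cases h2 : pvFirstTrue r'' (lo + 1) with
            | none => simp [h2] at hrec
            | some lo2 =>
              cases h3 : pvCuts rows'' (lo2 + 1) with
              | none => simp [h2, h3] at hrec
              | some cs3 => simp [h2, h3] at hrec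
          obtain ⟨c2, cs', hcseq⟩ : ∃ c2 cs', cs = c2 :: cs' := by
            cases cs with
            | nil => exact absurd rfl hcs
            | cons a b => exact ⟨a, b, rfl⟩
          subst hcseq
          have hihs := ih (lo + 1) (c2 :: cs') (by omega) (by simp) hrec
          show pvStepC r c (pvAllC ((r'' :: rows'').zip (c2 :: cs')))
              = (pvAll (r :: r'' :: rows'')).filter (pvHeadGe c)
          rw [hihs]
          show _ = ((pvSpine r 0).flatMap _).filter (pvHeadGe c)
          rw [pvFilterLevel, pvStepC_eq r c _ hc]
          apply List.flatMap_congr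
          intro i hi
          have hci : c ≤ i := by simpa using (List.mem_filter.mp hi).2
          have hloi : lo ≤ i := hmin i (List.mem_of_mem_filter hi) hci
          apply congrArg
          rw [List.filter_filter]
          apply List.filter_congr
          intro s _
          cases s with
          | nil => simp [pvHeadGt, pvHeadGe]
          | cons h t =>
            simp only [pvHeadGt, pvHeadGe]
            by_cases hih : i < h
            · simp only [hih, decide_true, Bool.true_and, decide_eq_true_eq]; omega
            · simp [hih]

-- B's fold over the reversed dropLast of the pairs equals the recursive pvAllC
theorem pvFold_allC (tl : List (List Bool × Int)) :
    ∀ (p l : List Bool × Int), (p :: tl).getLast? = some l →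
      ((p :: tl).dropLast.reverse).foldl (fun nxt q => pvStepC q.1 q.2 nxt)
        (pvBaseC l.1 l.2) = pvAllC (p :: tl) := by
  induction tl with
  | nil =>
    intro p l hl
    simp at hl
    simp [hl, pvAllC]
  | cons q tl' ih =>
    intro p l hl
    rw [List.getLast?_cons_cons] at hl
    rw [List.dropLast_cons₂, List.reverse_cons, List.foldl_append, ih q l hl]
    simp [pvAllC]

-- ===== VERDICT (by name: the statement is the Claim_ definition above) =====
theorem sequence_helper_py_spec : Claim_equal_sequence_helper_py := by
  intro arr start _ hpre
  unfold Spec_sequence_helper_py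
  obtain ⟨hne, hs⟩ := hpre
  cases arr with
  | nil => exact absurd rfl hne
  | cons r rest =>
    rw [pvA_eq rest r start hs]
    unfold sequence_helper_py_alt
    cases hcuts : pvCuts (r :: rest) start with
    | none => exact pvCuts_none (r :: rest) start hs (by simp) hcuts
    | some cuts =>
      obtain ⟨c2, cs, hceq⟩ : ∃ c2 cs, cuts = c2 :: cs := by
        unfold pvCuts at hcuts
        cases hft : pvFirstTrue r start with
        | none => simp [hft] at hcuts
        | some lo =>
          cases h3 : pvCuts rest (lo + 1) with
          | none => simp [hft, h3] at hcuts
          | some cs3 =>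
            simp only [hft, h3, Option.map_some, Option.some.injEq] at hcuts
            exact ⟨start, cs3, hcuts.symm⟩
      subst hceq
      have hzip : (r :: rest).zip (c2 :: cs) = (r, c2) :: rest.zip cs := rfl
      obtain ⟨l, hl⟩ : ∃ l, ((r, c2) :: rest.zip cs).getLast? = some l := by
        cases h : rest.zip cs with
        | nil => exact ⟨(r, c2), by simp⟩
        | cons a b =>
          refine ⟨(a :: b).getLast (by simp), ?_⟩
          rw [List.getLast?_cons_cons]
          exact List.getLast?_eq_some_getLast _
      simp only [hzip]
      rw [PySem.List.pyGet?_neg_one, hl]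
      show _ = ((((r, c2) :: rest.zip cs).dropLast.reverse).foldl
          (fun nxt q => pvStepC q.1 q.2 nxt) (pvBaseC l.1 l.2))
      rw [pvFold_allC (rest.zip cs) (r, c2) l hl]
      exact (pvCuts_some (r :: rest) start (c2 :: cs) hs (by simp) hcuts).symm
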